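-- pv_equiv track=rewrite | github.com/nishanrajkantan/luxehouze | myapi/myapp/views.py | find_year
-- ===== SOURCE A (Python) =====
-- years = {'2022': [' 2022', '/2022', '-2022'],
--          '2021': [' 2021', '/2021', '-2021'],
--          '2020': [' 2020', '/2020', '-2020'],
--          '2019': [' 2019', '/2019', '-2019'],
--          '2018': [' 2018', '/2018', '-2018'],
--          '2017': [' 2017', '/2017', '-2017'],
--          '2016': [' 2016', '/2016', '-2016'],
--          '2015': [' 2015', '/2015', '-2015'],
--          '2014': [' 2014', '/2014', '-2014'],
--          '2013': [' 2013', '/2013', '-2013'],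
--          '2012': [' 2012', '/2012', '-2012'],
--          '2011': [' 2011', '/2011', '-2011'],
--          '2010': [' 2010', '/2010', '-2010'],
--          '2009': [' 2009', '/2009', '-2009'],
--          '2008': [' 2008', '/2008', '-2008'],
--          '2007': [' 2007', '/2007', '-2007'],
--          '2006': [' 2006', '/2006', '-2006'],
--          '2005': [' 2005', '/2005', '-2005'],
--          '2004': [' 2004', '/2004', '-2004'],
--          '2003': [' 2003', '/2003', '-2003'],
--          '2002': [' 2002', '/2002', '-2002'],
--          '2001': [' 2001', '/2001', '-2001'],
--          '2000': [' 2000', '/2000', '-2000']}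
--
-- def find_year(text):
--     year = ''
--     for year_index, year_variations in years.items():
--         for index in year_variations:
--             if text.find(index) != -1:
--                 year = year_index
--
--     if year == '':
--         year = None
--     return year
-- ===== SOURCE B (Python) =====
-- YEARS = frozenset(str(y) for y in range(2000, 2023))
--
-- def find_year(text):
--     # single left-to-right scan; keep the smallest year string seen
--     best = None
--     for i in range(len(text) - 4):
--         if text[i] in ' /-':
--             chunk = text[i + 1:i + 5]
--             if chunk in YEARS and (best is None or chunk < best):
--                 best = chunk
--     return best
-- ===== Notes on version B (the rewrite author's own statement) =====
-- stated objective: alternative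
-- what changed: Replaces 69 fixed substring find() scans that overwrite a variable (last, i.e. smallest, match wins) with a single left-to-right positional scan that extracts every separator-prefixed 4-char window, tests it against a set of the 23 year strings, and keeps the minimum.
import Mathlib
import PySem

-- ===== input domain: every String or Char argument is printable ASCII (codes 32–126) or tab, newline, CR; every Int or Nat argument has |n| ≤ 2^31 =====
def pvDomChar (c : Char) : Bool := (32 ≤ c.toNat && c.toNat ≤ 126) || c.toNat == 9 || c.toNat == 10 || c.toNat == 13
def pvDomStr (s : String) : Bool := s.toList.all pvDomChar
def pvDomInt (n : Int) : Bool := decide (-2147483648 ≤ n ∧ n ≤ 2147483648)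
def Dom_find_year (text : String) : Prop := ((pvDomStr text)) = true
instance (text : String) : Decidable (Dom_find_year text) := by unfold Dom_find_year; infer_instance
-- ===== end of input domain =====

-- B replaces A's 69 fixed substring scans (last, i.e. smallest, match wins) by one left-to-right
-- positional scan that collects separator-prefixed 4-char windows and keeps the minimum (objective: alternative).

-- ===== PORT A =====
def years : PySem.Dict String (List String) :=
  PySem.Dict.ofList
    [("2022", [" 2022", "/2022", "-2022"]),
     ("2021", [" 2021", "/2021", "-2021"]),
     ("2020", [" 2020", "/2020", "-2020"]),
     ("2019", [" 2019", "/2019", "-2019"]),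
     ("2018", [" 2018", "/2018", "-2018"]),
     ("2017", [" 2017", "/2017", "-2017"]),
     ("2016", [" 2016", "/2016", "-2016"]),
     ("2015", [" 2015", "/2015", "-2015"]),
     ("2014", [" 2014", "/2014", "-2014"]),
     ("2013", [" 2013", "/2013", "-2013"]),
     ("2012", [" 2012", "/2012", "-2012"]),
     ("2011", [" 2011", "/2011", "-2011"]),
     ("2010", [" 2010", "/2010", "-2010"]),
     ("2009", [" 2009", "/2009", "-2009"]),
     ("2008", [" 2008", "/2008", "-2008"]),
     ("2007", [" 2007", "/2007", "-2007"]),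
     ("2006", [" 2006", "/2006", "-2006"]),
     ("2005", [" 2005", "/2005", "-2005"]),
     ("2004", [" 2004", "/2004", "-2004"]),
     ("2003", [" 2003", "/2003", "-2003"]),
     ("2002", [" 2002", "/2002", "-2002"]),
     ("2001", [" 2001", "/2001", "-2001"]),
     ("2000", [" 2000", "/2000", "-2000"])]

def find_year (text : String) : Option String :=
  let year : String :=
    years.items.foldl
      (fun year p =>
        p.2.foldl (fun year idx => if PySem.Str.find text idx ≠ -1 then p.1 else year) year)
      ""
  if year = "" then none else some year

-- ===== PORT B =====
def pvYEARS : PySem.Set String :=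
  PySem.Set.ofList ((PySem.List.pyRange 2000 2023 1).map PySem.Int.toStr)

def find_year_alt (text : String) : Option String :=
  let s := text.toList
  (PySem.List.pyRange 0 ((s.length : Int) - 4) 1).foldl
    (fun best i =>
      -- Python's `text[i] in ' /-'`: text[i] is a 1-char string, so this is exactly
      -- membership of that character among ' ', '/', '-'
      if PySem.List.pyGetD s i ' ' ∈ [' ', '/', '-'] then
        let chunk := String.ofList (PySem.List.slice s (some (i + 1)) (some (i + 5)))
        if PySem.Set.contains pvYEARS chunk &&
            (match best with | none => true | some b => decide (chunk < b)) then
          some chunk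
        else best
      else best)
    none

-- ===== PRECONDITION & SPEC =====
def Spec_find_year (text : String) (out : Option String) : Prop := out = find_year_alt text
instance (text : String) (out : Option String) : Decidable (Spec_find_year text out) := by unfold Spec_find_year; infer_instance

-- ===== CLAIM (what is proved, stated in full; the proofs are below) =====
def Claim_equal_find_year : Prop := ∀ (text : String), Dom_find_year text → Spec_find_year text (find_year text)

-- ===== LEMMAS AND PROOFS =====

-- the 23 year strings, ascending
def pvYAsc : List String :=
  ["2000","2001","2002","2003","2004","2005","2006","2007","2008","2009","2010","2011",
   "2012","2013","2014","2015","2016","2017","2018","2019","2020","2021","2022"]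

-- 'some separator-prefixed occurrence of y in s' (A's notion of a hit)
def pvHit (s : List Char) (y : String) : Bool :=
  [' ', '/', '-'].any (fun c => PySem.Chars.isIn (c :: y.toList) s)

def pvChunk (s : List Char) (k : Nat) : String := String.ofList ((s.drop (k+1)).take 4)

def pvCand (s : List Char) (k : Nat) : Option String :=
  if s.getD k ' ' ∈ [' ', '/', '-'] ∧ pvChunk s k ∈ pvYAsc then some (pvChunk s k) else none

def pvMo : Option String → String → Option String :=
  fun b c => match b with | none => some c | some b' => if c < b' then some c else some b'

def pvM (s : List Char) : Nat := ((s.length : Int) - 4).toNat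

def pvLc (s : List Char) : List String := (List.range (pvM s)).filterMap (pvCand s)

theorem pv_innerA (t yk : String) (vs : List String) (a0 : String) :
    vs.foldl (fun y idx => if PySem.Str.find t idx ≠ -1 then yk else y) a0
      = if (vs.any fun idx => PySem.Str.isIn idx t) = true then yk else a0 := by
  induction vs generalizing a0 with
  | nil => simp
  | cons v vs ih =>
    rw [List.foldl_cons, ih, List.any_cons]
    by_cases h : PySem.Chars.isIn v.toList t.toList = true
    · have hf : ¬ (PySem.Chars.find t.toList v.toList = -1) := by
        rw [PySem.Chars.find_eq_neg_one_iff]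
        rw [PySem.Chars.isIn_iff_infix] at h
        exact fun hn => hn h
      simp [h, hf]
    · have hf : PySem.Chars.find t.toList v.toList = -1 := by
        rw [PySem.Chars.find_eq_neg_one_iff]
        intro hinf
        exact h ((PySem.Chars.isIn_iff_infix _ _).mpr hinf)
      simp [h, hf]

theorem pv_getLast_cons (a d : String) (m : List String) :
    ((a :: m).getLast?).getD d = (m.getLast?).getD a := by
  cases m with
  | nil => rfl
  | cons b m =>
    rw [List.getLast?_cons_cons]
    cases hl : (b :: m).getLast? with
    | none => rw [List.getLast?_eq_none_iff] at hl; cases hl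
    | some x => rfl

theorem pv_outerA (t : String) (l : List (String × List String)) (a0 : String) :
    l.foldl
      (fun year p =>
        p.2.foldl (fun year idx => if PySem.Str.find t idx ≠ -1 then p.1 else year) year) a0
    = (((l.filter (fun p => p.2.any fun idx => PySem.Str.isIn idx t)).map Prod.fst).getLast?).getD a0 := by
  induction l generalizing a0 with
  | nil => simp
  | cons p l ih =>
    rw [List.foldl_cons, pv_innerA, List.filter_cons]
    by_cases h : (p.2.any fun idx => PySem.Str.isIn idx t) = true
    · rw [if_pos h, if_pos h, List.map_cons, ih, pv_getLast_cons]
    · rw [if_neg h, if_neg h, ih]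

theorem pv_items :
    years.items
      = pvYAsc.reverse.map
          (fun y => (y, [' ', '/', '-'].map (fun c => String.ofList (c :: y.toList)))) := by
  decide

theorem pv_filter_map_fst (text : String) (l : List String) :
    ((l.map (fun y => (y, [' ', '/', '-'].map (fun c => String.ofList (c :: y.toList))))).filter
        (fun p => p.2.any fun idx => PySem.Str.isIn idx text)).map Prod.fst
      = l.filter (pvHit text.toList) := by
  induction l with
  | nil => rfl
  | cons y l ih =>
    rw [List.map_cons, List.filter_cons, List.filter_cons]
    have hy : ((y, [' ', '/', '-'].map (fun c => String.ofList (c :: y.toList))).2.any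
        fun idx => PySem.Str.isIn idx text) = pvHit text.toList y := by
      simp [pvHit]
    rw [hy]
    by_cases hc : pvHit text.toList y = true
    · rw [if_pos hc, if_pos hc, List.map_cons, ih]
    · rw [if_neg hc, if_neg hc, ih]

theorem pv_ne_empty : ∀ z ∈ pvYAsc, z ≠ "" := by decide

theorem pv_charA (text : String) :
    find_year text = (pvYAsc.filter (pvHit text.toList)).head? := by
  have hfold :
      years.items.foldl
        (fun year p =>
          p.2.foldl (fun year idx => if PySem.Str.find text idx ≠ -1 then p.1 else year) year) ""
      = ((pvYAsc.filter (pvHit text.toList)).head?).getD "" := by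
    rw [pv_outerA, pv_items, pv_filter_map_fst, List.filter_reverse, List.getLast?_reverse]
  show (if ((years.items.foldl
        (fun year p =>
          p.2.foldl (fun year idx => if PySem.Str.find text idx ≠ -1 then p.1 else year) year) "")) = ""
      then none
      else some ((years.items.foldl
        (fun year p =>
          p.2.foldl (fun year idx => if PySem.Str.find text idx ≠ -1 then p.1 else year) year) "")))
    = (pvYAsc.filter (pvHit text.toList)).head?
  rw [hfold]
  cases hh : (pvYAsc.filter (pvHit text.toList)).head? with
  | none => simp
  | some y =>
    have hmem : y ∈ pvYAsc.filter (pvHit text.toList) :=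
      List.mem_of_mem_head? (Option.mem_def.mpr hh)
    have hyne : y ≠ "" := pv_ne_empty y (List.mem_filter.mp hmem).1
    simp [hyne]

theorem pv_years_eq : pvYEARS = pvYAsc := by decide

theorem pv_stepB (t : List Char) (best : Option String) (k : Nat) :
    (if PySem.List.pyGetD t ((0:Int) + (k:Int)) ' ' ∈ [' ', '/', '-'] then
       if PySem.Set.contains pvYEARS
              (String.ofList (PySem.List.slice t (some ((0:Int) + (k:Int) + 1)) (some ((0:Int) + (k:Int) + 5)))) &&
            (match best with
             | none => true
             | some b =>
                 decide
                   ((String.ofList (PySem.List.slice t (some ((0:Int) + (k:Int) + 1)) (some ((0:Int) + (k:Int) + 5)))) < b)) then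
         some (String.ofList (PySem.List.slice t (some ((0:Int) + (k:Int) + 1)) (some ((0:Int) + (k:Int) + 5))))
       else best
     else best)
    = match pvCand t k with | none => best | some c => pvMo best c := by
  have hslice : PySem.List.slice t (some ((0:Int) + (k:Int) + 1)) (some ((0:Int) + (k:Int) + 5))
      = (t.drop (k+1)).take 4 := by
    have e1 : (0:Int) + (k:Int) + 1 = ((k+1 : Nat) : Int) := by push_cast; ring
    have e2 : (0:Int) + (k:Int) + 5 = ((k+1 : Nat) : Int) + ((4:Nat) : Int) := by push_cast; ring
    rw [e1, e2, PySem.List.slice_natCast_add]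
  have hget : PySem.List.pyGetD t ((0:Int) + (k:Int)) ' ' = t.getD k ' ' := by
    rw [zero_add]; simp
  rw [hget, hslice]
  by_cases hsep : t.getD k ' ' ∈ [' ', '/', '-']
  · rw [if_pos hsep]
    by_cases hmem : String.ofList ((t.drop (k+1)).take 4) ∈ pvYAsc
    · have hcont : PySem.Set.contains pvYEARS (String.ofList ((t.drop (k+1)).take 4)) = true := by
        rw [PySem.Set.contains_iff, pv_years_eq]; exact hmem
      have hcand : pvCand t k = some (String.ofList ((t.drop (k+1)).take 4)) := by
        unfold pvCand pvChunk
        rw [if_pos ⟨hsep, hmem⟩]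
      rw [hcand, hcont, Bool.true_and]
      cases best with
      | none => rfl
      | some b =>
        by_cases hlt : String.ofList ((t.drop (k+1)).take 4) < b
        · simp [pvMo, hlt]
        · simp [pvMo, hlt]
    · have hcont : PySem.Set.contains pvYEARS (String.ofList ((t.drop (k+1)).take 4)) = false := by
        rw [Bool.eq_false_iff]
        intro hc
        rw [PySem.Set.contains_iff, pv_years_eq] at hc
        exact hmem hc
      have hcand : pvCand t k = none := by
        unfold pvCand pvChunk
        rw [if_neg (fun hc => hmem hc.2)]
      rw [hcand, hcont, Bool.false_and]
      rfl
  · rw [if_neg hsep]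
    have hcand : pvCand t k = none := by
      unfold pvCand pvChunk
      rw [if_neg (fun hc => hsep hc.1)]
    rw [hcand]

theorem pv_foldB (t : List Char) (l : List Nat) (acc : Option String) :
    l.foldl
      (fun (best : Option String) (k : Nat) =>
        if PySem.List.pyGetD t ((0:Int) + (k:Int)) ' ' ∈ [' ', '/', '-'] then
          if PySem.Set.contains pvYEARS
                (String.ofList (PySem.List.slice t (some ((0:Int) + (k:Int) + 1)) (some ((0:Int) + (k:Int) + 5)))) &&
              (match best with
               | none => true
               | some b =>
                   decide
                     ((String.ofList (PySem.List.slice t (some ((0:Int) + (k:Int) + 1)) (some ((0:Int) + (k:Int) + 5)))) < b)) then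
            some (String.ofList (PySem.List.slice t (some ((0:Int) + (k:Int) + 1)) (some ((0:Int) + (k:Int) + 5))))
          else best
        else best) acc
      = (l.filterMap (pvCand t)).foldl pvMo acc := by
  induction l generalizing acc with
  | nil => rfl
  | cons k l ih =>
    simp only [List.foldl_cons, List.filterMap_cons]
    rw [pv_stepB]
    cases hc : pvCand t k with
    | none => simp only [ih]
    | some c => simp only [List.foldl_cons, ih]

theorem pv_charB (text : String) :
    find_year_alt text = (pvLc text.toList).foldl pvMo none := by
  have hrange : PySem.List.pyRange 0 ((text.toList.length : Int) - 4) 1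
      = (List.range (pvM text.toList)).map (fun (k : Nat) => (0:Int) + (k:Int)) := by
    rw [PySem.List.pyRange_one]
    have h : ((text.toList.length : Int) - 4 - 0).toNat = pvM text.toList := by
      unfold pvM; omega
    rw [h]
  simp only [find_year_alt]
  rw [hrange, List.foldl_map]
  exact pv_foldB text.toList (List.range (pvM text.toList)) none

theorem pv_mo_some (l : List String) (b : String) :
    ∃ m, l.foldl pvMo (some b) = some m ∧ m ≤ b ∧ (m = b ∨ m ∈ l) ∧ ∀ y ∈ l, m ≤ y := by
  induction l generalizing b with
  | nil => exact ⟨b, rfl, le_refl _, Or.inl rfl, by simp⟩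
  | cons c t ih =>
    by_cases h : c < b
    · obtain ⟨m, hm, hle, hmem, hall⟩ := ih c
      refine ⟨m, ?_, le_trans hle (le_of_lt h), ?_, ?_⟩
      · simpa [pvMo, h] using hm
      · rcases hmem with rfl | hmem
        · exact Or.inr List.mem_cons_self
        · exact Or.inr (List.mem_cons_of_mem _ hmem)
      · intro y hy
        rcases List.mem_cons.mp hy with rfl | hy
        · exact hle
        · exact hall y hy
    · obtain ⟨m, hm, hle, hmem, hall⟩ := ih b
      refine ⟨m, ?_, hle, ?_, ?_⟩
      · simpa [pvMo, h] using hm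
      · rcases hmem with rfl | hmem
        · exact Or.inl rfl
        · exact Or.inr (List.mem_cons_of_mem _ hmem)
      · intro y hy
        rcases List.mem_cons.mp hy with rfl | hy
        · exact le_trans hle (not_lt.mp h)
        · exact hall y hy

theorem pv_len4 : ∀ y ∈ pvYAsc, y.toList.length = 4 := by decide

theorem pv_bridge (s : List Char) (y : String) (hy : y ∈ pvYAsc) :
    pvHit s y = true ↔ y ∈ pvLc s := by
  have hy4 : y.toList.length = 4 := pv_len4 y hy
  unfold pvHit pvLc
  rw [List.any_eq_true]
  constructor
  · rintro ⟨c, hcmem, hin⟩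
    obtain ⟨j, hpre⟩ := (PySem.Chars.exists_prefix_drop_iff_isIn (c :: y.toList) s).mpr hin
    have hlen : j + 5 ≤ s.length := by
      have h1 := hpre.length_le
      simp [hy4] at h1
      omega
    have hj : j < s.length := by omega
    rw [List.drop_eq_getElem_cons hj, List.cons_prefix_iff] at hpre
    obtain ⟨t2, ht, hp2⟩ := hpre
    injection ht with hc ht2
    subst ht2
    rw [List.prefix_iff_eq_take, hy4] at hp2
    have hchunk : pvChunk s j = y := by
      unfold pvChunk
      rw [← hp2]
      simp
    have hsep : s.getD j ' ' ∈ [' ', '/', '-'] := by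
      rw [List.getD_eq_getElem s ' ' hj, hc]
      exact hcmem
    refine List.mem_filterMap.mpr ⟨j, List.mem_range.mpr ?_, ?_⟩
    · unfold pvM; omega
    · unfold pvCand
      rw [if_pos ⟨hsep, by rw [hchunk]; exact hy⟩, hchunk]
  · intro hmem
    obtain ⟨k, hkr, hcand⟩ := List.mem_filterMap.mp hmem
    unfold pvCand at hcand
    split at hcand
    · rename_i hcnd
      injection hcand with hcv
      have hkM : k < pvM s := List.mem_range.mp hkr
      have hlen : k + 5 ≤ s.length := by
        unfold pvM at hkM; omega
      have hk : k < s.length := by omega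
      have htake : (s.drop (k+1)).take 4 = y.toList := by
        have h := congrArg String.toList hcv
        simpa [pvChunk] using h
      refine ⟨s.getD k ' ', hcnd.1, ?_⟩
      apply (PySem.Chars.exists_prefix_drop_iff_isIn _ _).mp
      refine ⟨k, ?_⟩
      rw [List.getD_eq_getElem s ' ' hk, List.drop_eq_getElem_cons hk]
      apply List.cons_prefix_cons.mpr ⟨rfl, ?_⟩
      rw [List.prefix_iff_eq_take, hy4, htake]
    · exact absurd hcand (by simp)

theorem pv_head_filter (l : List String) (hp : l.Pairwise (fun a b => a ≤ b)) (p : String → Bool)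
    (h : String) (hh : (l.filter p).head? = some h) :
    h ∈ l ∧ p h = true ∧ ∀ z ∈ l, p z = true → h ≤ z := by
  induction l with
  | nil => simp at hh
  | cons a t ih =>
    rw [List.pairwise_cons] at hp
    by_cases ha : p a = true
    · rw [List.filter_cons_of_pos ha] at hh
      simp only [List.head?_cons, Option.some.injEq] at hh
      subst hh
      refine ⟨List.mem_cons_self, ha, ?_⟩
      intro z hz _
      rcases List.mem_cons.mp hz with rfl | hz
      · exact le_refl _
      · exact hp.1 z hz
    · rw [List.filter_cons_of_neg (by simpa using ha)] at hh
      obtain ⟨hm, hph, hall⟩ := ih hp.2 hh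
      refine ⟨List.mem_cons_of_mem _ hm, hph, ?_⟩
      intro z hz hpz
      rcases List.mem_cons.mp hz with rfl | hz
      · exact absurd hpz ha
      · exact hall z hz hpz

theorem pv_sorted : pvYAsc.Pairwise (fun a b => a ≤ b) := by
  have h : (pvYAsc.map String.toList).Pairwise (fun a b => a < b) := by decide
  rw [List.pairwise_map] at h
  exact h.imp (fun hab => le_of_lt (String.lt_iff_toList_lt.mpr hab))

theorem pv_mem_lc (s : List Char) (m : String) (hm : m ∈ pvLc s) : m ∈ pvYAsc := by
  obtain ⟨k, _, hk⟩ := List.mem_filterMap.mp hm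
  unfold pvCand at hk
  split at hk
  · rename_i hcond
    cases hk
    exact hcond.2
  · exact absurd hk (by simp)

theorem pv_final (text : String) : find_year text = find_year_alt text := by
  rw [pv_charA, pv_charB]
  cases hlc : pvLc text.toList with
  | nil =>
    have hfil : pvYAsc.filter (pvHit text.toList) = [] := by
      rw [List.filter_eq_nil_iff]
      intro y hy hhit
      have h := (pv_bridge text.toList y hy).mp hhit
      rw [hlc] at h
      simp at h
    rw [hfil]
    rfl
  | cons c t =>
    obtain ⟨m, hm, hle, hmem, hall⟩ := pv_mo_some t c
    have hmlc : m ∈ pvLc text.toList := by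
      rw [hlc]
      rcases hmem with rfl | hmem
      · exact List.mem_cons_self
      · exact List.mem_cons_of_mem _ hmem
    have hmy : m ∈ pvYAsc := pv_mem_lc text.toList m hmlc
    have hmin : ∀ y ∈ pvLc text.toList, m ≤ y := by
      intro y hy
      rw [hlc] at hy
      rcases List.mem_cons.mp hy with rfl | hy
      · exact hle
      · exact hall y hy
    have hhitm : pvHit text.toList m = true := (pv_bridge text.toList m hmy).mpr hmlc
    have hfne : m ∈ pvYAsc.filter (pvHit text.toList) := List.mem_filter.mpr ⟨hmy, hhitm⟩
    cases hhd : (pvYAsc.filter (pvHit text.toList)).head? with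
    | none =>
      rw [List.head?_eq_none_iff] at hhd
      rw [hhd] at hfne
      simp at hfne
    | some h =>
      obtain ⟨hhy, hhith, hmin'⟩ := pv_head_filter pvYAsc pv_sorted (pvHit text.toList) h hhd
      have hhlc : h ∈ pvLc text.toList := (pv_bridge text.toList h hhy).mp hhith
      have heq : h = m := le_antisymm (hmin' m hmy hhitm) (hmin h hhlc)
      rw [List.foldl_cons]
      show some h = t.foldl pvMo (pvMo none c)
      rw [show pvMo none c = some c from rfl, hm, heq]

-- ===== VERDICT (by name: the statement is the Claim_ definition above) =====
theorem find_year_spec : Claim_equal_find_year := by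
  intro text _
  unfold Spec_find_year
  exact pv_final text
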